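-- pv_equiv track=rewrite | github.com/sidequery/sidemantic | sidemantic/adapters/tableau.py | _convert_double_quotes
-- ===== SOURCE A (Python) =====
-- def _convert_double_quotes(text: str) -> str:
--     """Convert Tableau double-quoted string literals to SQL single quotes.
--
--     Tableau uses "hello" for strings, SQL uses 'hello'. Double quotes in SQL
--     mean identifiers. Must skip brackets (already processed) and single-quoted
--     strings.
--     """
--     result = []
--     i = 0
--     while i < len(text):
--         c = text[i]
--         if c == "'":
--             # Single-quoted string: pass through as-is
--             result.append(c)
--             i += 1
--             while i < len(text):
--                 result.append(text[i])
--                 if text[i] == "'" and (i + 1 >= len(text) or text[i + 1] != "'"):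
--                     i += 1
--                     break
--                 i += 1
--         elif c == '"':
--             # Double-quoted string: convert to single quotes
--             result.append("'")
--             i += 1
--             while i < len(text):
--                 if text[i] == '"':
--                     if i + 1 < len(text) and text[i + 1] == '"':
--                         # Escaped double quote -> escaped single quote
--                         result.append("''")
--                         i += 2
--                     else:
--                         result.append("'")
--                         i += 1
--                         break
--                 else:
--                     result.append(text[i])
--                     i += 1
--         else:
--             result.append(c)
--             i += 1
--     return "".join(result)
-- ===== SOURCE B (Python) =====
-- def _step(mode, c):
--     """One transition of a 5-state Mealy machine: emits exactly one char per input char.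
--
--     modes: 0 outside, 1 in single-quoted, 2 in double-quoted,
--            3 just saw ' while in single, 4 just saw " while in double."""
--     if mode == 4 and c == '"':
--         return "'", 2  # completed "" escape inside a double-quoted literal
--     if mode == 3:
--         mode = 1 if c == "'" else 0
--     elif mode == 4:
--         mode = 0
--     if mode == 1:
--         return c, (3 if c == "'" else 1)
--     if mode == 2:
--         return ("'", 4) if c == '"' else (c, 2)
--     return ("'" if c == '"' else c), (1 if c == "'" else 2 if c == '"' else 0)
--
--
-- def _convert_double_quotes(text: str) -> str:
--     out = []
--     mode = 0
--     for c in text: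
--         ch, mode = _step(mode, c)
--         out.append(ch)
--     return "".join(out)
-- ===== Notes on version B (the rewrite author's own statement) =====
-- stated objective: simpler
-- what changed: A's nested while-loops with one-character lookahead and pair-skipping are replaced by a single uniform pass of a 5-state Mealy machine (a pure step function folded over the characters) that emits exactly one output character per input character.
import Mathlib
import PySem

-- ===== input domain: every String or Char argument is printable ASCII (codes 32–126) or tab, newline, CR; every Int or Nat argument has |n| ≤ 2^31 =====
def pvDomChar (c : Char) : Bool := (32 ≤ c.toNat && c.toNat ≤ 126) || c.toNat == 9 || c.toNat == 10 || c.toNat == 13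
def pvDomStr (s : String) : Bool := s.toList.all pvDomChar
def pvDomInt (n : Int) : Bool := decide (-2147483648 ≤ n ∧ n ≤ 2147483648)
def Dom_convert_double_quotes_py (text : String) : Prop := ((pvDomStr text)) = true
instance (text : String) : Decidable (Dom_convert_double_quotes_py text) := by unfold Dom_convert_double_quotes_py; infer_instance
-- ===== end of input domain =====

-- B replaces A's nested while-loops (one-character lookahead, pair-skipping) by a single pass
-- of a 5-state Mealy machine emitting exactly one character per input character (objective: simpler).


-- ===== PORT A =====
-- inner while-loop for a single-quoted literal: returns (appended chars, remaining input)
def aSingle : List Char → List Char × List Char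
  | [] => ([], [])
  | c :: rest =>
      if c = '\'' ∧ rest.head? ≠ some '\'' then ([c], rest)
      else
        let p := aSingle rest
        (c :: p.1, p.2)

-- inner while-loop for a double-quoted literal: returns (appended chars, remaining input)
def aDouble : List Char → List Char × List Char
  | [] => ([], [])
  | c :: rest =>
      if c = '"' then
        match rest with
        | d :: rest2 =>
            if d = '"' then
              let p := aDouble rest2
              ('\'' :: '\'' :: p.1, p.2)
            else (['\''], d :: rest2)
        | [] => (['\''], [])
      else
        let p := aDouble rest
        (c :: p.1, p.2)

-- unfolding of aDouble on a non-quote head (the match equations only cover quote heads)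
theorem aDouble_cons_ne (c : Char) (rest : List Char) (h : ¬ c = '"') :
    aDouble (c :: rest) = (c :: (aDouble rest).1, (aDouble rest).2) := by
  rw [aDouble.eq_def]
  simp [h]

-- the two loops only consume input (needed for termination of aMain)
theorem aSingle_len (l : List Char) : (aSingle l).2.length ≤ l.length := by
  induction l with
  | nil => simp [aSingle]
  | cons c rest ih =>
      simp only [aSingle]
      split
      · simp
      · simpa using Nat.le_succ_of_le ih

theorem aDouble_len (l : List Char) : (aDouble l).2.length ≤ l.length := by
  induction l using aDouble.induct with
  | case1 => simp [aDouble]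
  | case2 rest2 ih => simp [aDouble]; omega
  | case3 d rest2 hd => simp [aDouble, hd]
  | case4 => simp [aDouble]
  | case5 c rest h ih => rw [aDouble_cons_ne c rest h]; simpa using Nat.le_succ_of_le ih

-- outer while-loop of A
def aMain : List Char → List Char
  | [] => []
  | c :: rest =>
      if c = '\'' then
        let p := aSingle rest
        c :: (p.1 ++ aMain p.2)
      else if c = '"' then
        let p := aDouble rest
        '\'' :: (p.1 ++ aMain p.2)
      else c :: aMain rest
termination_by l => l.length
decreasing_by
  · exact Nat.lt_succ_of_le (aSingle_len rest)
  · exact Nat.lt_succ_of_le (aDouble_len rest)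
  · simp

def convert_double_quotes_py (text : String) : String :=
  String.ofList (aMain text.toList)

-- ===== PORT B =====
-- one transition of B's Mealy machine (port of _step in Source B)
-- modes: 0 outside, 1 in single-quoted, 2 in double-quoted, 3 just saw ' in single, 4 just saw " in double
def bStep (mode : Int) (c : Char) : Char × Int :=
  if mode = 4 ∧ c = '"' then ('\'', 2)
  else
    let m : Int := if mode = 3 then (if c = '\'' then 1 else 0)
                   else if mode = 4 then 0 else mode
    if m = 1 then (c, if c = '\'' then 3 else 1)
    else if m = 2 then (if c = '"' then ('\'', 4) else (c, 2))
    else ((if c = '"' then '\'' else c),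
          if c = '\'' then 1 else if c = '"' then 2 else 0)

-- the for-loop of Source B: run the machine over the characters
def bRun : Int → List Char → List Char
  | _, [] => []
  | m, c :: rest =>
      let p := bStep m c
      p.1 :: bRun p.2 rest

def convert_double_quotes_py_alt (text : String) : String :=
  String.ofList (bRun 0 text.toList)

-- ===== PRECONDITION & SPEC =====
def Spec_convert_double_quotes_py (text : String) (out : String) : Prop := out = convert_double_quotes_py_alt text
instance (text : String) (out : String) : Decidable (Spec_convert_double_quotes_py text out) := by unfold Spec_convert_double_quotes_py; infer_instance

-- ===== CLAIM (what is proved, stated in full; the proofs are below) =====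
def Claim_equal_convert_double_quotes_py : Prop := ∀ (text : String), Dom_convert_double_quotes_py text → Spec_convert_double_quotes_py text (convert_double_quotes_py text)

-- ===== LEMMAS AND PROOFS =====

-- the remainder returned by aSingle never starts with a single quote
theorem aSingle_head (l : List Char) : (aSingle l).2.head? ≠ some '\'' := by
  induction l using aSingle.induct with
  | case1 => simp [aSingle]
  | case2 c rest h => simp [aSingle, h]
  | case3 c rest h ih => simpa [aSingle, h] using ih

-- the remainder returned by aDouble never starts with a double quote
theorem aDouble_head (l : List Char) : (aDouble l).2.head? ≠ some '"' := by
  induction l using aDouble.induct with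
  | case1 => simp [aDouble]
  | case2 rest2 ih => simpa [aDouble] using ih
  | case3 d rest2 hd => simp [aDouble, hd]
  | case4 => simp [aDouble]
  | case5 c rest h ih => rw [aDouble_cons_ne c rest h]; simpa using ih

-- after a literal closes, the pending states 3 and 4 act like state 0 on the remaining input
theorem bRun3_eq0 (l : List Char) (h : l.head? ≠ some '\'') : bRun 3 l = bRun 0 l := by
  cases l with
  | nil => rfl
  | cons c rest =>
      have hc : ¬ c = '\'' := by simpa using h
      simp [bRun, bStep, hc]

theorem bRun4_eq0 (l : List Char) (h : l.head? ≠ some '"') : bRun 4 l = bRun 0 l := by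
  cases l with
  | nil => rfl
  | cons c rest =>
      have hc : ¬ c = '"' := by simpa using h
      simp [bRun, bStep, hc]

-- B in state 1 emits exactly what A's single-quote loop appends, then continues in state 3
theorem bRun1_single (l : List Char) :
    bRun 1 l = (aSingle l).1 ++ bRun 3 (aSingle l).2 := by
  induction l using aSingle.induct with
  | case1 => simp [bRun, aSingle]
  | case2 c rest h =>
      obtain ⟨hc, hh⟩ := h
      subst hc
      simp [aSingle, hh, bRun, bStep]
  | case3 c rest h ih =>
      by_cases hc : c = '\''
      · subst hc
        have hh : rest.head? = some '\'' := by
          by_contra hx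
          exact h ⟨rfl, hx⟩
        have h3 : bRun 3 rest = bRun 1 rest := by
          cases rest with
          | nil => simp at hh
          | cons d rest2 =>
              have hd : d = '\'' := by simpa using hh
              subst hd
              simp [bRun, bStep]
        simp [aSingle, hh, bRun, bStep, h3, ih]
      · simp [aSingle, bRun, bStep, hc, ih]

-- B in state 2 emits exactly what A's double-quote loop appends, then continues in state 4
theorem bRun2_double (l : List Char) :
    bRun 2 l = (aDouble l).1 ++ bRun 4 (aDouble l).2 := by
  induction l using aDouble.induct with
  | case1 => simp [bRun, aDouble]
  | case2 rest2 ih => simp [aDouble, bRun, bStep, ih]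
  | case3 d rest2 hd => simp [aDouble, hd, bRun, bStep]
  | case4 => simp [aDouble, bRun, bStep]
  | case5 c rest h ih => rw [aDouble_cons_ne c rest h]; simp [bRun, bStep, h, ih]

-- main equivalence: B's machine started in state 0 computes A's outer loop
theorem bRun0_main (l : List Char) : bRun 0 l = aMain l := by
  induction l using aMain.induct with
  | case1 => simp [bRun, aMain]
  | case2 rest p ih =>
      have hS := bRun1_single rest
      rw [bRun3_eq0 _ (aSingle_head rest)] at hS
      have ih' : bRun 0 (aSingle rest).2 = aMain (aSingle rest).2 := ih
      simp [aMain, bRun, bStep, hS, ih']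
  | case3 rest p h ih =>
      have hD := bRun2_double rest
      rw [bRun4_eq0 _ (aDouble_head rest)] at hD
      have ih' : bRun 0 (aDouble rest).2 = aMain (aDouble rest).2 := ih
      simp [aMain, bRun, bStep, hD, ih']
  | case4 c rest h1 h2 ih =>
      simp [aMain, bRun, bStep, h1, h2, ih]

-- ===== VERDICT (by name: the statement is the Claim_ definition above) =====
theorem convert_double_quotes_py_spec : Claim_equal_convert_double_quotes_py := by
  intro text _
  unfold Spec_convert_double_quotes_py convert_double_quotes_py convert_double_quotes_py_alt
  rw [bRun0_main]
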